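-- pv_equiv track=rewrite | github.com/cirosantilli/project-euler-solutions | solvers/931.py | T_naive
-- ===== SOURCE A (Python) =====
-- from math import isqrt
--
-- def sieve_primes(limit: int) -> list[int]:
--     """Return a list of all primes <= limit using an odd-only sieve."""
--     if limit < 2:
--         return []
--     if limit == 2:
--         return [2]
--
--     # odd numbers: index i represents (2*i + 1)
--     size = (limit // 2) + 1
--     is_comp = bytearray(size)
--     primes = [2]
--
--     r = isqrt(limit)
--     for i in range(1, (r // 2) + 1):
--         if not is_comp[i]:
--             p = 2 * i + 1
--             start = (p * p) // 2
--             step = p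
--             is_comp[start::step] = b"\x01" * (((size - 1 - start) // step) + 1)
--
--     for i in range(1, size):
--         if not is_comp[i]:
--             primes.append(2 * i + 1)
--     return primes
--
-- def factorize(n: int, primes: list[int]) -> list[tuple[int, int]]:
--     """Prime factorization using a provided prime list up to sqrt(n)."""
--     out: list[tuple[int, int]] = []
--     tmp = n
--     for p in primes:
--         if p * p > tmp:
--             break
--         if tmp % p == 0:
--             e = 0
--             while tmp % p == 0:
--                 tmp //= p
--                 e += 1
--             out.append((p, e))
--     if tmp > 1:
--         out.append((tmp, 1))
--     return out
--
-- def t_of_n(n: int, primes: list[int]) -> int: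
--     """Compute t(n) exactly from the closed form.
--
--     If n = \prod p_i^{e_i}, then:
--       t(n) = \sum_{p^e || n} (n/p^e) * ( (p-1)p^{e-1} - 1 )
--     """
--     fac = factorize(n, primes)
--     total = 0
--     for p, e in fac:
--         pe = p**e
--         total += (n // pe) * ((p - 1) * (p ** (e - 1)) - 1)
--     return total
--
-- def T_naive(N: int) -> int:
--     """Naive T(N) for small N, used only for asserts."""
--     if N <= 1:
--         return 0
--     primes = sieve_primes(isqrt(N) + 10)
--     s = 0
--     for n in range(2, N + 1):
--         s += t_of_n(n, primes)
--     return s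
-- ===== SOURCE B (Python) =====
-- def _t(n):
--     """t(n) accumulated inline while trial-dividing n by 2 and then the odd numbers."""
--     total = 0
--     tmp = n
--     d = 2
--     while d * d <= tmp:
--         if tmp % d == 0:
--             e = 0
--             pe = 1
--             while tmp % d == 0:
--                 tmp //= d
--                 e += 1
--                 pe *= d
--             total += (n // pe) * ((d - 1) * (pe // d) - 1)
--         d = 3 if d == 2 else d + 2
--     if tmp > 1:
--         total += (n // tmp) * (tmp - 2)
--     return total
--
--
-- def T_naive(N: int) -> int:
--     """Naive T(N) for small N, used only for asserts."""
--     if N <= 1: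
--         return 0
--     total = 0
--     for n in range(2, N + 1):
--         total += _t(n)
--     return total
-- ===== Notes on version B (the rewrite author's own statement) =====
-- stated objective: simpler
-- what changed: Drops the prime sieve and the precomputed prime list entirely: B factors each n directly by trial division (first two, then the odd candidates), accumulating t(n) inline while tracking the prime power pe, instead of building a factorization list of (p,e) pairs.
import Mathlib
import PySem

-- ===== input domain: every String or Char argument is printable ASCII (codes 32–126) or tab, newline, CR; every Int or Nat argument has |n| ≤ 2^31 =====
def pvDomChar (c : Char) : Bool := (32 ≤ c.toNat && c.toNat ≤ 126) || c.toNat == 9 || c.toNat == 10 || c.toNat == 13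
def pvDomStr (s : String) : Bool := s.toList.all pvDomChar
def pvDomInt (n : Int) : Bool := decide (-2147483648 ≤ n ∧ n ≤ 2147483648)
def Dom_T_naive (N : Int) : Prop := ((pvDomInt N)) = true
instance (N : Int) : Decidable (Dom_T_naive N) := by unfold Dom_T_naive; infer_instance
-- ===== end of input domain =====

-- B drops A's prime sieve and precomputed prime list and instead factors each n directly
-- by trial division (first two, then the odd candidates), accumulating t(n) inline (objective: simpler).

-- ===== PORT A =====
-- All integers A manipulates are nonnegative (sizes, divisors, floor divisions of
-- nonnegative values), so the helpers are ported over Nat; Nat's `/`, `%`, `^` agree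
-- with Python's on nonnegative operands, and every `-` below is applied where the
-- Python difference is nonnegative ((p-1)*p^(e-1) ≥ 1 because p ≥ 2 and e ≥ 1).

-- A's inner `while tmp % p == 0: tmp //= p; e += 1`;
-- `2 ≤ p ∧ 0 < tmp` in the guard is a totality guard only (always true at A's call site)
def pvDivOut (p tmp e : Nat) : Nat × Nat :=
  if h : 2 ≤ p ∧ 0 < tmp ∧ tmp % p = 0 then pvDivOut p (tmp / p) (e + 1) else (tmp, e)
termination_by tmp
decreasing_by exact Nat.div_lt_self h.2.1 h.1

-- A's `for p in primes: if p * p > tmp: break; ...` loop of factorize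
def pvFacLoop : List Nat → Nat → List (Nat × Nat) → Nat × List (Nat × Nat)
  | [], tmp, out => (tmp, out)
  | p :: ps, tmp, out =>
    if tmp < p * p then (tmp, out)
    else if tmp % p = 0 then
      pvFacLoop ps (pvDivOut p tmp 0).1 (out ++ [(p, (pvDivOut p tmp 0).2)])
    else pvFacLoop ps tmp out

def pvFactorize (n : Nat) (primes : List Nat) : List (Nat × Nat) :=
  if 1 < (pvFacLoop primes n []).1
  then (pvFacLoop primes n []).2 ++ [((pvFacLoop primes n []).1, 1)]
  else (pvFacLoop primes n []).2

-- the summand (n // p**e) * ((p - 1) * p**(e - 1) - 1) of A's t_of_n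
def pvF (n : Nat) (pr : Nat × Nat) : Nat :=
  (n / pr.1 ^ pr.2) * ((pr.1 - 1) * pr.1 ^ (pr.2 - 1) - 1)

def pvTOfN (n : Nat) (primes : List Nat) : Nat :=
  (pvFactorize n primes).foldl (fun total pr => total + pvF n pr) 0

-- one iteration of A's sieve-marking loop; the bytearray is a List Bool and the slice
-- assignment `is_comp[start::p] = b"\x01" * cnt` is the fold setting those cnt indices
-- (cnt computed with Python's floor division exactly as A does; it is ≤ 0 — an empty
-- slice — exactly when start ≥ size, so List.set never clamps here)
def pvMark (size : Nat) (a : List Bool) (i : Nat) : List Bool :=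
  if a.getD i false = false then
    (List.range (PySem.Int.floordiv ((size : Int) - 1 - ((2 * i + 1) * (2 * i + 1) / 2 : Nat))
        ((2 * i + 1 : Nat) : Int) + 1).toNat).foldl
      (fun b k => b.set ((2 * i + 1) * (2 * i + 1) / 2 + k * (2 * i + 1)) true) a
  else a

def pvSievePrimes (limit : Nat) : List Nat :=
  if limit < 2 then []
  else if limit = 2 then [2]
  else
    (List.range' 1 (limit / 2 + 1 - 1)).foldl
      (fun ps i =>
        if ((List.range' 1 (Nat.sqrt limit / 2)).foldl (pvMark (limit / 2 + 1))
            (List.replicate (limit / 2 + 1) false)).getD i false = false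
        then ps ++ [2 * i + 1] else ps) [2]

-- range(2, N+1) is List.range' 2 (N.toNat - 1) (here N ≥ 2); math.isqrt is Nat.sqrt
def T_naive (N : Int) : Int :=
  if N ≤ 1 then 0
  else
    Int.ofNat ((List.range' 2 (N.toNat - 1)).foldl
      (fun s n => s + pvTOfN n (pvSievePrimes (Nat.sqrt N.toNat + 10))) 0)

-- ===== PORT B =====
-- B's inner `while tmp % d == 0: tmp //= d; e += 1; pe *= d`;
-- `2 ≤ d ∧ 0 < tmp` in the guard is a totality guard only (always true at B's call site)
def pvDivAll (d tmp e pe : Nat) : Nat × Nat × Nat :=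
  if h : 2 ≤ d ∧ 0 < tmp ∧ tmp % d = 0 then pvDivAll d (tmp / d) (e + 1) (pe * d)
  else (tmp, e, pe)
termination_by tmp
decreasing_by exact Nat.div_lt_self h.2.1 h.1

-- termination facts for pvTLoop (cited in its decreasing_by)
theorem pvDivAll_fst_le (d tmp e pe : Nat) : (pvDivAll d tmp e pe).1 ≤ tmp := by
  induction tmp using Nat.strong_induction_on generalizing e pe with
  | _ tmp ih =>
    rw [pvDivAll]
    split
    · rename_i h
      exact le_trans (ih _ (Nat.div_lt_self h.2.1 h.1) _ _) (Nat.div_le_self _ _)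
    · exact le_refl _

theorem pvDivAll_fst_lt (d tmp e pe : Nat) (h : 2 ≤ d ∧ 0 < tmp ∧ tmp % d = 0) :
    (pvDivAll d tmp e pe).1 < tmp := by
  rw [pvDivAll, dif_pos h]
  exact lt_of_le_of_lt (pvDivAll_fst_le _ _ _ _) (Nat.div_lt_self h.2.1 h.1)

-- B's `while d * d <= tmp` loop of _t, carrying (tmp, d, total);
-- `2 ≤ d` in the guard is a totality guard only (d starts at 2 and only grows)
def pvTLoop (n tmp d total : Nat) : Nat :=
  if h : d * d ≤ tmp ∧ 2 ≤ d then
    if hd : tmp % d = 0 then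
      pvTLoop n (pvDivAll d tmp 0 1).1 (if d = 2 then 3 else d + 2)
        (total + (n / (pvDivAll d tmp 0 1).2.2) *
          ((d - 1) * ((pvDivAll d tmp 0 1).2.2 / d) - 1))
    else pvTLoop n tmp (if d = 2 then 3 else d + 2) total
  else if 1 < tmp then total + (n / tmp) * (tmp - 2) else total
termination_by (tmp, tmp + 2 - d)
decreasing_by
  · exact Prod.Lex.left _ _ (pvDivAll_fst_lt d tmp 0 1 ⟨h.2, by nlinarith [h.1, h.2], hd⟩)
  · have hdt : d < tmp := by nlinarith [h.1, h.2]
    exact Prod.Lex.right _ (by split <;> omega)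

def pvTAlt (n : Nat) : Nat := pvTLoop n n 2 0

def T_naive_alt (N : Int) : Int :=
  if N ≤ 1 then 0
  else Int.ofNat ((List.range' 2 (N.toNat - 1)).foldl (fun s n => s + pvTAlt n) 0)

-- ===== PRECONDITION & SPEC =====
def Spec_T_naive (N : Int) (out : Int) : Prop := out = T_naive_alt N
instance (N : Int) (out : Int) : Decidable (Spec_T_naive N out) := by
  unfold Spec_T_naive; infer_instance

-- ===== CLAIM (what is proved, stated in full; the proofs are below) =====
def Claim_equal_T_naive : Prop := ∀ (N : Int), Dom_T_naive N → Spec_T_naive N (T_naive N)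

-- ===== LEMMAS AND PROOFS =====

-- the canonical factorization of m, pulled off smallest prime factor first
def pvCanon (m : Nat) : List (Nat × Nat) :=
  if h : 1 < m then
    (m.minFac, (pvDivAll m.minFac m 0 1).2.1) :: pvCanon (pvDivAll m.minFac m 0 1).1
  else []
termination_by m
decreasing_by
  exact pvDivAll_fst_lt _ _ _ _
    ⟨(Nat.minFac_prime (by omega)).two_le, by omega,
      Nat.mod_eq_zero_of_dvd (Nat.minFac_dvd m)⟩

theorem pvDivAll_shift (d tmp e pe : Nat) :
    pvDivAll d tmp e pe =
      ((pvDivAll d tmp 0 1).1, e + (pvDivAll d tmp 0 1).2.1,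
        pe * (pvDivAll d tmp 0 1).2.2) := by
  induction tmp using Nat.strong_induction_on generalizing e pe with
  | _ tmp ih =>
    by_cases h : 2 ≤ d ∧ 0 < tmp ∧ tmp % d = 0
    · have hlt : tmp / d < tmp := Nat.div_lt_self h.2.1 h.1
      rw [pvDivAll, dif_pos h]
      conv_rhs => rw [pvDivAll, dif_pos h]
      simp only [Nat.zero_add, Nat.one_mul]
      rw [ih _ hlt (e + 1) (pe * d), ih _ hlt 1 d]
      simp only [Prod.mk.injEq]
      exact ⟨by trivial, by omega, by ring⟩
    · rw [pvDivAll, dif_neg h]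
      conv_rhs => rw [pvDivAll, dif_neg h]
      simp

theorem pvDivAll_pe (d tmp : Nat) :
    (pvDivAll d tmp 0 1).2.2 = d ^ (pvDivAll d tmp 0 1).2.1 := by
  induction tmp using Nat.strong_induction_on with
  | _ tmp ih =>
    by_cases h : 2 ≤ d ∧ 0 < tmp ∧ tmp % d = 0
    · have hlt : tmp / d < tmp := Nat.div_lt_self h.2.1 h.1
      rw [pvDivAll, dif_pos h]
      simp only [Nat.zero_add, Nat.one_mul]
      rw [pvDivAll_shift d (tmp / d) 1 d]
      show d * (pvDivAll d (tmp / d) 0 1).2.2 = d ^ (1 + (pvDivAll d (tmp / d) 0 1).2.1)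
      rw [ih _ hlt, pow_add, pow_one]
    · rw [pvDivAll, dif_neg h]
      simp

theorem pvDivAll_fst_pos (d tmp e pe : Nat) : 0 < tmp → 0 < (pvDivAll d tmp e pe).1 := by
  induction tmp using Nat.strong_induction_on generalizing e pe with
  | _ tmp ih =>
    intro h0
    rw [pvDivAll]
    split
    · rename_i h
      exact ih _ (Nat.div_lt_self h.2.1 h.1) _ _
        (Nat.div_pos (Nat.le_of_dvd h.2.1 (Nat.dvd_of_mod_eq_zero h.2.2)) (by omega))
    · exact h0

theorem pvDivAll_fst_mod (d tmp e pe : Nat) (h2 : 2 ≤ d) :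
    0 < tmp → (pvDivAll d tmp e pe).1 % d ≠ 0 := by
  induction tmp using Nat.strong_induction_on generalizing e pe with
  | _ tmp ih =>
    intro h0
    rw [pvDivAll]
    split
    · rename_i h
      exact ih _ (Nat.div_lt_self h.2.1 h.1) _ _
        (Nat.div_pos (Nat.le_of_dvd h.2.1 (Nat.dvd_of_mod_eq_zero h.2.2)) (by omega))
    · rename_i h
      simp only [not_and] at h
      exact h h2 h0

theorem pvDivAll_fst_dvd (d tmp e pe : Nat) : (pvDivAll d tmp e pe).1 ∣ tmp := by
  induction tmp using Nat.strong_induction_on generalizing e pe with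
  | _ tmp ih =>
    rw [pvDivAll]
    split
    · rename_i h
      exact dvd_trans (ih _ (Nat.div_lt_self h.2.1 h.1) _ _)
        (Nat.div_dvd_of_dvd (Nat.dvd_of_mod_eq_zero h.2.2))
    · exact dvd_refl _

theorem pvDivAll_e_pos (d tmp : Nat) (h : 2 ≤ d ∧ 0 < tmp ∧ tmp % d = 0) :
    1 ≤ (pvDivAll d tmp 0 1).2.1 := by
  rw [pvDivAll, dif_pos h]
  simp only [Nat.zero_add, Nat.one_mul]
  rw [pvDivAll_shift d (tmp / d) 1 d]
  show 1 ≤ 1 + (pvDivAll d (tmp / d) 0 1).2.1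
  omega

theorem pvDivOut_eq (p tmp e : Nat) :
    pvDivOut p tmp e = ((pvDivAll p tmp e 1).1, (pvDivAll p tmp e 1).2.1) := by
  induction tmp using Nat.strong_induction_on generalizing e with
  | _ tmp ih =>
    by_cases h : 2 ≤ p ∧ 0 < tmp ∧ tmp % p = 0
    · have hlt : tmp / p < tmp := Nat.div_lt_self h.2.1 h.1
      rw [pvDivOut, dif_pos h]
      conv_rhs => rw [pvDivAll, dif_pos h]
      simp only [Nat.one_mul]
      rw [ih _ hlt (e + 1), pvDivAll_shift p (tmp / p) (e + 1) 1,
        pvDivAll_shift p (tmp / p) (e + 1) p]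
    · rw [pvDivOut, dif_neg h]
      conv_rhs => rw [pvDivAll, dif_neg h]

-- tmp > 1 with no prime factor q with q*q ≤ tmp is prime; its canonical list is [(tmp,1)]
theorem pvCanon_terminal (tmp : Nat) (h1 : 1 < tmp)
    (hall : ∀ q : Nat, q.Prime → q ∣ tmp → tmp < q * q) : pvCanon tmp = [(tmp, 1)] := by
  have hp : tmp.Prime := by
    by_contra hnp
    have h' := Nat.minFac_sq_le_self (show 0 < tmp by omega) hnp
    have h'' := hall tmp.minFac (Nat.minFac_prime (by omega)) (Nat.minFac_dvd tmp)
    rw [pow_two] at h'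
    omega
  rw [pvCanon, dif_pos h1, hp.minFac_eq]
  have h01 : pvDivAll tmp tmp 0 1 = (1, 1, tmp) := by
    have hone : (1 : Nat) % tmp = 1 := Nat.one_mod_eq_one.mpr (by omega)
    rw [pvDivAll, dif_pos ⟨hp.two_le, by omega, Nat.mod_self tmp⟩,
      Nat.div_self (by omega), pvDivAll, dif_neg (by simp [hone])]
    simp
  rw [h01]
  rw [pvCanon, dif_neg (by omega)]

-- ===== B side: the trial-division loop computes the canonical t-sum =====
theorem pvTLoop_eq (n tmp d total : Nat) :
    2 ≤ d → (d = 2 ∨ d % 2 = 1) → 0 < tmp →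
    (∀ q : Nat, q.Prime → q ∣ tmp → d ≤ q) →
    pvTLoop n tmp d total = total + ((pvCanon tmp).map (pvF n)).sum := by
  induction tmp, d, total using pvTLoop.induct n with
  | case1 tmp d total h hd ih =>
    intro h2 hpar h0 hinv
    simp only [dite_eq_ite] at ih
    have hdvd : d ∣ tmp := Nat.dvd_of_mod_eq_zero hd
    have htmp4 : 4 ≤ tmp := by nlinarith [h.1, h.2]
    have hdp : d.Prime := by
      by_contra hnp
      have hm := Nat.minFac_prime (show d ≠ 1 by omega)
      have hmlt : d.minFac < d :=
        lt_of_le_of_ne (Nat.minFac_le (by omega)) (fun he => hnp (he ▸ hm))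
      have := hinv d.minFac hm (dvd_trans (Nat.minFac_dvd d) hdvd)
      omega
    have hmin : tmp.minFac = d := by
      have hle : tmp.minFac ≤ d := Nat.minFac_le_of_dvd h2 hdvd
      have hge : d ≤ tmp.minFac :=
        hinv tmp.minFac (Nat.minFac_prime (by omega)) (Nat.minFac_dvd tmp)
      omega
    have hr1pos : 0 < (pvDivAll d tmp 0 1).1 := pvDivAll_fst_pos d tmp 0 1 h0
    have hr1mod : (pvDivAll d tmp 0 1).1 % d ≠ 0 := pvDivAll_fst_mod d tmp 0 1 h2 h0
    have hepos : 1 ≤ (pvDivAll d tmp 0 1).2.1 := pvDivAll_e_pos d tmp ⟨h2, h0, hd⟩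
    have hinv' : ∀ q : Nat, q.Prime → q ∣ (pvDivAll d tmp 0 1).1 →
        (if d = 2 then 3 else d + 2) ≤ q := by
      intro q hq hqdvd
      have hqtmp : q ∣ tmp := dvd_trans hqdvd (pvDivAll_fst_dvd d tmp 0 1)
      have hqd : d ≤ q := hinv q hq hqtmp
      have hqne : q ≠ d := by
        rintro rfl
        exact hr1mod (Nat.mod_eq_zero_of_dvd hqdvd)
      have hqodd : q = 2 ∨ q % 2 = 1 := Nat.Prime.eq_two_or_odd hq
      split <;> omega
    rw [pvTLoop, dif_pos h, dif_pos hd]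
    rw [ih (by split <;> omega) (by split <;> omega) hr1pos hinv']
    conv_rhs => rw [pvCanon, dif_pos (show 1 < tmp by omega)]
    rw [hmin]
    simp only [List.map_cons, List.sum_cons]
    have hterm : n / (pvDivAll d tmp 0 1).2.2 *
        ((d - 1) * ((pvDivAll d tmp 0 1).2.2 / d) - 1) =
        pvF n (d, (pvDivAll d tmp 0 1).2.1) := by
      rw [pvF]
      simp only
      rw [pvDivAll_pe d tmp]
      have hpow : d ^ (pvDivAll d tmp 0 1).2.1 / d = d ^ ((pvDivAll d tmp 0 1).2.1 - 1) := by
        have h' : d ^ (pvDivAll d tmp 0 1).2.1 = d ^ ((pvDivAll d tmp 0 1).2.1 - 1) * d := by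
          rw [← pow_succ]
          congr 1
          omega
        rw [h', Nat.mul_div_cancel _ (by omega)]
      rw [hpow]
    rw [hterm]
    omega
  | case2 tmp d total h hd ih =>
    intro h2 hpar h0 hinv
    simp only [dite_eq_ite] at ih
    have hinv' : ∀ q : Nat, q.Prime → q ∣ tmp → (if d = 2 then 3 else d + 2) ≤ q := by
      intro q hq hqdvd
      have hqd : d ≤ q := hinv q hq hqdvd
      have hqne : q ≠ d := by rintro rfl; exact hd (Nat.mod_eq_zero_of_dvd hqdvd)
      have hqodd : q = 2 ∨ q % 2 = 1 := Nat.Prime.eq_two_or_odd hq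
      split <;> omega
    rw [pvTLoop, dif_pos h, dif_neg hd]
    exact ih (by split <;> omega) (by split <;> omega) h0 hinv'
  | case3 tmp d total h h1 =>
    intro h2 hpar h0 hinv
    have hterm : ∀ q : Nat, q.Prime → q ∣ tmp → tmp < q * q := by
      intro q hq hqdvd
      have hqd : d ≤ q := hinv q hq hqdvd
      have hA : ¬ d * d ≤ tmp := fun hc => h ⟨hc, h2⟩
      have := Nat.mul_le_mul hqd hqd
      omega
    rw [pvTLoop, dif_neg h, if_pos h1, pvCanon_terminal tmp h1 hterm]
    simp only [List.map_cons, List.map_nil, List.sum_cons, List.sum_nil, Nat.add_zero]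
    have : pvF n (tmp, 1) = n / tmp * (tmp - 2) := by
      rw [pvF]
      simp only [pow_one, Nat.sub_self, pow_zero, Nat.mul_one]
      try congr 1
      try omega
    rw [this]
  | case4 tmp d total h h1 =>
    intro h2 hpar h0 hinv
    rw [pvTLoop, dif_neg h, if_neg h1, pvCanon, dif_neg h1]
    simp

-- terminal configuration shared by both branches of pvFacLoop_eq
theorem pvTerminal (tmp : Nat) (out : List (Nat × Nat)) (h0 : 0 < tmp)
    (hall : ∀ q : Nat, q.Prime → q ∣ tmp → tmp < q * q) :
    (if 1 < tmp then out ++ [(tmp, 1)] else out) = out ++ pvCanon tmp := by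
  by_cases h1 : 1 < tmp
  · rw [if_pos h1, pvCanon_terminal tmp h1 hall]
  · rw [if_neg h1, pvCanon, dif_neg h1, List.append_nil]

-- ===== A side: facLoop over a sorted, complete prime list computes pvCanon =====
theorem pvFacLoop_eq (n : Nat) (ps : List Nat) : ∀ (tmp : Nat) (out : List (Nat × Nat)),
    List.Pairwise (· < ·) ps → (∀ x ∈ ps, 2 ≤ x) → 0 < tmp →
    (∀ q : Nat, q.Prime → q ∣ tmp → q * q ≤ tmp → q ∈ ps) →
    (if 1 < (pvFacLoop ps tmp out).1
      then (pvFacLoop ps tmp out).2 ++ [((pvFacLoop ps tmp out).1, 1)]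
      else (pvFacLoop ps tmp out).2) = out ++ pvCanon tmp := by
  induction ps with
  | nil =>
    intro tmp out _ _ h0 H
    simp only [pvFacLoop]
    exact pvTerminal tmp out h0
      (fun q hq hqd => by
        by_contra hc
        exact absurd (H q hq hqd (by omega)) (List.not_mem_nil))
  | cons p ps ih =>
    intro tmp out hsort hmem h0 H
    have hsort' := List.pairwise_cons.mp hsort
    by_cases hbr : tmp < p * p
    · simp only [pvFacLoop, if_pos hbr]
      refine pvTerminal tmp out h0 (fun q hq hqd => ?_)
      by_contra hc
      have hq2 : q * q ≤ tmp := by omega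
      rcases List.mem_cons.mp (H q hq hqd hq2) with h' | hin
      · subst h'; omega
      · have := hsort'.1 q hin
        have := Nat.mul_le_mul (le_of_lt this) (le_of_lt this)
        omega
    · by_cases hd : tmp % p = 0
      · simp only [pvFacLoop, if_neg hbr, if_pos hd]
        have hple : p * p ≤ tmp := Nat.le_of_not_lt hbr
        have hp2 : 2 ≤ p := hmem p List.mem_cons_self
        have hdvd : p ∣ tmp := Nat.dvd_of_mod_eq_zero hd
        have hptmp : p ≤ tmp := Nat.le_of_dvd h0 hdvd
        have hpp : p.Prime := by
          by_contra hnp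
          have hm := Nat.minFac_prime (show p ≠ 1 by omega)
          have hmsq : p.minFac * p.minFac ≤ p := by
            have := Nat.minFac_sq_le_self (show 0 < p by omega) hnp
            rw [pow_two] at this
            exact this
          have hmlt : p.minFac < p :=
            lt_of_le_of_ne (Nat.minFac_le (by omega)) (fun he => hnp (he ▸ hm))
          have hmemm := H p.minFac hm (dvd_trans (Nat.minFac_dvd p) hdvd)
            (le_trans hmsq hptmp)
          rcases List.mem_cons.mp hmemm with h' | hin
          · omega
          · have := hsort'.1 _ hin; omega
        have hminf : tmp.minFac = p := by
          have hle : tmp.minFac ≤ p := Nat.minFac_le_of_dvd hp2 hdvd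
          rcases lt_or_eq_of_le hle with hlt | he
          · exfalso
            have hmprime := Nat.minFac_prime (show tmp ≠ 1 by omega)
            have hmm : tmp.minFac * tmp.minFac ≤ tmp := by
              have := Nat.mul_le_mul (le_of_lt hlt) (le_of_lt hlt)
              omega
            rcases List.mem_cons.mp (H tmp.minFac hmprime (Nat.minFac_dvd tmp) hmm) with
              h' | hin
            · omega
            · have := hsort'.1 _ hin; omega
          · exact he
        rw [pvDivOut_eq p tmp 0]
        have h0' : 0 < (pvDivAll p tmp 0 1).1 := pvDivAll_fst_pos p tmp 0 1 h0
        have H' : ∀ q : Nat, q.Prime → q ∣ (pvDivAll p tmp 0 1).1 →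
            q * q ≤ (pvDivAll p tmp 0 1).1 → q ∈ ps := by
          intro q hq hqd hqq
          have hq1 : q ∣ tmp := dvd_trans hqd (pvDivAll_fst_dvd p tmp 0 1)
          have hq2 : q * q ≤ tmp := le_trans hqq (pvDivAll_fst_le p tmp 0 1)
          rcases List.mem_cons.mp (H q hq hq1 hq2) with h' | hin
          · exfalso
            subst h'
            exact pvDivAll_fst_mod q tmp 0 1 hp2 h0 (Nat.mod_eq_zero_of_dvd hqd)
          · exact hin
        rw [ih (pvDivAll p tmp 0 1).1 (out ++ [(p, (pvDivAll p tmp 0 1).2.1)]) hsort'.2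
          (fun x hx => hmem x (List.mem_cons_of_mem _ hx)) h0' H']
        conv_rhs => rw [pvCanon, dif_pos (show 1 < tmp by omega)]
        rw [hminf, List.append_assoc]
        rfl
      · simp only [pvFacLoop, if_neg hbr, if_neg hd]
        refine ih tmp out hsort'.2
          (fun x hx => hmem x (List.mem_cons_of_mem _ hx)) h0 (fun q hq hqd hqq => ?_)
        rcases List.mem_cons.mp (H q hq hqd hqq) with h' | hin
        · exfalso; subst h'; exact hd (Nat.mod_eq_zero_of_dvd hqd)
        · exact hin

-- ===== sieve: only composite odd positions are ever marked =====
def pvComp (limit : Nat) : List Bool :=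
  (List.range' 1 (Nat.sqrt limit / 2)).foldl (pvMark (limit / 2 + 1))
    (List.replicate (limit / 2 + 1) false)

def pvInv (a : List Bool) : Prop := ∀ j : Nat, a.getD j false = true → ¬ Nat.Prime (2 * j + 1)

theorem pvInv_replicate (size : Nat) : pvInv (List.replicate size false) := by
  intro j hj
  exfalso
  rw [List.getD_eq_getElem?_getD, List.getElem?_replicate] at hj
  split at hj <;> simp_all

theorem pvInv_set (a : List Bool) (m : Nat) (hm : ¬ Nat.Prime (2 * m + 1)) (ha : pvInv a) :
    pvInv (a.set m true) := by
  intro j hj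
  rw [List.getD_eq_getElem?_getD, List.getElem?_set] at hj
  split at hj
  · rename_i hmj
    split at hj
    · exact hmj ▸ hm
    · simp at hj
  · exact ha j (by rw [List.getD_eq_getElem?_getD]; exact hj)

theorem pvInv_markInner (p start : Nat)
    (hcomp : ∀ k : Nat, ¬ Nat.Prime (2 * (start + k * p) + 1)) :
    ∀ (l : List Nat) (a : List Bool), pvInv a →
      pvInv (l.foldl (fun b k => b.set (start + k * p) true) a) := by
  intro l
  induction l with
  | nil => intro a ha; exact ha
  | cons k l ihl => intro a ha; exact ihl _ (pvInv_set a _ (hcomp k) ha)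

theorem pvNotPrime_pos (i k : Nat) (hi : 1 ≤ i) :
    ¬ Nat.Prime (2 * ((2 * i + 1) * (2 * i + 1) / 2 + k * (2 * i + 1)) + 1) := by
  intro hp
  have hhalf : (2 * i + 1) * (2 * i + 1) / 2 = 2 * i * i + 2 * i := by
    have h' : (2 * i + 1) * (2 * i + 1) = 2 * (2 * i * i + 2 * i) + 1 := by ring
    omega
  have hval : 2 * ((2 * i + 1) * (2 * i + 1) / 2 + k * (2 * i + 1)) + 1
      = (2 * i + 1) * ((2 * i + 1) + 2 * k) := by
    rw [hhalf]; ring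
  rw [hval] at hp
  rcases hp.eq_one_or_self_of_dvd (2 * i + 1) ⟨(2 * i + 1) + 2 * k, rfl⟩ with h' | h'
  · omega
  · have h'' : (2 * i + 1) * 1 = (2 * i + 1) * ((2 * i + 1) + 2 * k) := by omega
    have := Nat.eq_of_mul_eq_mul_left (show 0 < 2 * i + 1 by omega) h''
    omega

theorem pvInv_mark (size : Nat) (a : List Bool) (i : Nat) (hi : 1 ≤ i) (ha : pvInv a) :
    pvInv (pvMark size a i) := by
  rw [pvMark]
  split
  · exact pvInv_markInner (2 * i + 1) ((2 * i + 1) * (2 * i + 1) / 2)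
      (fun k => pvNotPrime_pos i k hi) _ a ha
  · exact ha

theorem pvInv_comp (limit : Nat) : pvInv (pvComp limit) := by
  rw [pvComp]
  have : ∀ (l : List Nat), (∀ i ∈ l, 1 ≤ i) → ∀ a : List Bool, pvInv a →
      pvInv (l.foldl (pvMark (limit / 2 + 1)) a) := by
    intro l
    induction l with
    | nil => intro _ a ha; exact ha
    | cons i l ihl =>
      intro hl a ha
      exact ihl (fun j hj => hl j (List.mem_cons_of_mem _ hj)) _
        (pvInv_mark _ a i (hl i List.mem_cons_self) ha)
  exact this _ (fun i hi => (List.mem_range'_1.mp hi).1) _ (pvInv_replicate _)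

-- structure of the sieve output, for limit > 2
theorem pvSieve_eq (limit : Nat) (h2 : 2 < limit) :
    pvSievePrimes limit =
      2 :: (((List.range' 1 (limit / 2 + 1 - 1)).filter
        (fun i => !(pvComp limit).getD i false)).map (fun i => 2 * i + 1)) := by
  rw [pvSievePrimes, if_neg (by omega), if_neg (by omega)]
  rw [show (List.range' 1 (Nat.sqrt limit / 2)).foldl (pvMark (limit / 2 + 1))
    (List.replicate (limit / 2 + 1) false) = pvComp limit from rfl]
  simp only [show ∀ (ps : List Nat) (i : Nat),
    (if (pvComp limit).getD i false = false then ps ++ [2 * i + 1] else ps)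
      = (if (!(pvComp limit).getD i false) = true then ps ++ [2 * i + 1] else ps) from by
    intro ps i; cases (pvComp limit).getD i false <;> simp]
  rw [PySem.List.foldl_append_if (fun i => !(pvComp limit).getD i false)
    (fun i => 2 * i + 1)]
  rfl

theorem pvSieve_sorted (limit : Nat) (h2 : 2 < limit) :
    List.Pairwise (· < ·) (pvSievePrimes limit) := by
  rw [pvSieve_eq limit h2, List.pairwise_cons]
  constructor
  · intro b hb
    rcases List.mem_map.mp hb with ⟨i, hi, rfl⟩
    have := (List.mem_range'_1.mp (List.mem_filter.mp hi).1).1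
    show 2 < 2 * i + 1
    omega
  · have hr : List.Pairwise (· < ·) (List.range' 1 (limit / 2 + 1 - 1)) :=
      List.pairwise_lt_range' 1 (by norm_num)
    exact List.pairwise_map.mpr
      ((List.Pairwise.sublist List.filter_sublist hr).imp (fun hab => by omega))

theorem pvSieve_two_le (limit : Nat) (h2 : 2 < limit) :
    ∀ x ∈ pvSievePrimes limit, 2 ≤ x := by
  rw [pvSieve_eq limit h2]
  intro x hx
  rcases List.mem_cons.mp hx with rfl | hx
  · omega
  · rcases List.mem_map.mp hx with ⟨i, hi, rfl⟩
    have := (List.mem_range'_1.mp (List.mem_filter.mp hi).1).1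
    show 2 ≤ 2 * i + 1
    omega

theorem pvSieve_complete (limit : Nat) (h2 : 2 < limit) :
    ∀ q : Nat, q.Prime → q ≤ limit → q ∈ pvSievePrimes limit := by
  intro q hq hql
  rw [pvSieve_eq limit h2]
  by_cases hq2 : q = 2
  · exact hq2 ▸ List.mem_cons_self
  · have hq2' : 2 < q := lt_of_le_of_ne hq.two_le (Ne.symm hq2)
    have hqodd : q % 2 = 1 := by
      rcases Nat.Prime.eq_two_or_odd hq with h' | h'
      · omega
      · exact h'
    apply List.mem_cons_of_mem
    apply List.mem_map.mpr
    refine ⟨q / 2, List.mem_filter.mpr ⟨List.mem_range'_1.mpr ⟨by omega, ?_⟩, ?_⟩,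
      by show 2 * (q / 2) + 1 = q; omega⟩
    · have hdd : q / 2 ≤ limit / 2 := Nat.div_le_div_right hql
      omega
    · have hfalse : (pvComp limit).getD (q / 2) false = false := by
        by_contra hc
        have htrue : (pvComp limit).getD (q / 2) false = true := by
          revert hc
          cases (pvComp limit).getD (q / 2) false <;> simp
        have := pvInv_comp limit (q / 2) htrue
        have hqeq : 2 * (q / 2) + 1 = q := by omega
        rw [hqeq] at this
        exact this hq
      rw [hfalse]
      rfl

-- pointwise equality of the two per-n computations
theorem pvTOfN_eq_pvTAlt (N n : Nat) (hn : 2 ≤ n) (hN : n ≤ N) :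
    pvTOfN n (pvSievePrimes (Nat.sqrt N + 10)) = pvTAlt n := by
  have hL2 : 2 < Nat.sqrt N + 10 := by omega
  have hfac : pvFactorize n (pvSievePrimes (Nat.sqrt N + 10)) = pvCanon n := by
    rw [pvFactorize]
    have := pvFacLoop_eq n (pvSievePrimes (Nat.sqrt N + 10)) n []
      (pvSieve_sorted _ hL2) (pvSieve_two_le _ hL2) (by omega)
      (fun q hq hqd hqq => pvSieve_complete _ hL2 q hq (by
        have hsq : q ≤ Nat.sqrt N := Nat.le_sqrt.mpr (le_trans hqq hN)
        omega))
    simpa using this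
  have hB : pvTAlt n = 0 + ((pvCanon n).map (pvF n)).sum :=
    pvTLoop_eq n n 2 0 (le_refl 2) (Or.inl rfl) (by omega) (fun q hq _ => hq.two_le)
  rw [pvTOfN, hfac, PySem.List.foldl_add_nat, hB]

-- ===== VERDICT (by name: the statement is the Claim_ definition above) =====
theorem T_naive_spec : Claim_equal_T_naive := by
  intro N _
  unfold Spec_T_naive T_naive T_naive_alt
  by_cases hN : N ≤ 1
  · rw [if_pos hN, if_pos hN]
  · rw [if_neg hN, if_neg hN]
    apply congrArg
    apply PySem.List.foldl_congr_mem
    intro acc n hn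
    rcases List.mem_range'_1.mp hn with ⟨h2, hlt⟩
    have hNn : n ≤ N.toNat := by omega
    rw [pvTOfN_eq_pvTAlt N.toNat n h2 hNn]
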